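-- pv_equiv track=rewrite | github.com/Kodsport/swedish-olympiad-2025-public | skol/theodortrollkarlen/submissions/partially_accepted/joshua_bottomup_nk2.py | count_bottomup
-- ===== SOURCE A (Python) =====
-- MOD = int(1e9 + 7)
--
-- def count_bottomup(n, k, s, a):
--     dp = [[0] * (k + 1) for _ in range(n + 1)]
--     dp[0][0] = 1
--
--     global_damage = k * a
--     for i in range(1, n + 1):
--         for j in range(k + 1):
--             dp[i][j] += dp[i - 1][j] * global_damage
--             dp[i][j] %= MOD
--
--             for l in range(j):
--                 dp[i][j] += s * dp[i - 1][l]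
--                 dp[i][j] %= MOD
--
--     ret = sum(dp[n][i] for i in range(k + 1))
--     return ret % MOD
-- ===== SOURCE B (Python) =====
-- MOD = int(1e9 + 7)
--
-- def count_bottomup(n, k, s, a):
--     # One pass per row with a running (mod-reduced) prefix sum of the previous
--     # row, instead of rescanning dp[i-1][0..j-1] for every j.
--     g = k * a % MOD
--     row = [1] + [0] * k
--     for _ in range(n):
--         new = []
--         pref = 0
--         for v in row:
--             new.append((v * g + s * pref) % MOD)
--             pref = (pref + v) % MOD
--         row = new
--     return sum(row) % MOD
-- ===== Notes on version B (the rewrite author's own statement) =====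
-- stated objective: faster
-- what changed: Replaces the O(k) inner rescan of the previous DP row for every cell by a single running mod-reduced prefix sum maintained during one pass over the row (and keeps only one row instead of the whole n x k table).
-- outside the precondition, e.g. on count_bottomup(-1, 3, 1, 1): A raises IndexError, B returns 1; on count_bottomup(2, -1, 1, 1): A raises IndexError, B returns 1
import Mathlib
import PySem

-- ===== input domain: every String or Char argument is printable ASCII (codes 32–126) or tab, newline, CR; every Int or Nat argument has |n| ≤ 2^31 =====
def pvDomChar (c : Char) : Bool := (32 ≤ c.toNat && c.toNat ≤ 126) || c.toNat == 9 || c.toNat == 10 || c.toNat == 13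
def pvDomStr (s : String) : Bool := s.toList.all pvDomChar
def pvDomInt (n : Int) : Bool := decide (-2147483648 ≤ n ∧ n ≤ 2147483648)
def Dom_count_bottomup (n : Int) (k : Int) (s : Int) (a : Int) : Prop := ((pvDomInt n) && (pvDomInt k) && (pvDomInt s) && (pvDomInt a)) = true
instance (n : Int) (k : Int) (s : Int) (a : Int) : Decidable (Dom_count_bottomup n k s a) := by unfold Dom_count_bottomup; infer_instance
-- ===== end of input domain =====

-- B replaces A's inner rescan of the previous DP row by a running mod-reduced
-- prefix sum (one pass per row, only one row kept); measured asymptotically faster.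

def MODC : Int := 1000000007

-- ===== PORT A =====
-- dp[i] depends only on dp[i-1], so the dp table is carried as the previous row;
-- each cell is computed exactly as A does: dp[i-1][j]*g then mod, then the inner
-- loop over l in range(j) adding s*dp[i-1][l] with a mod after each addition.
-- Indexing dp[i-1][..] uses pyGetD (always in range under Pre_).
def rowStepA (prev : List Int) (g s : Int) (k : Int) : List Int :=
  (PySem.List.pyRange 0 (k + 1) 1).map (fun j =>
    (PySem.List.pyRange 0 j 1).foldl
      (fun acc l => PySem.Int.mod (acc + s * PySem.List.pyGetD prev l 0) MODC)
      (PySem.Int.mod (PySem.List.pyGetD prev j 0 * g) MODC))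

def count_bottomup (n : Int) (k : Int) (s : Int) (a : Int) : Int :=
  let row0 := (List.replicate (k + 1).toNat 0).set 0 1   -- [0]*(k+1) with dp[0][0] = 1
  let g := k * a
  let last := (PySem.List.pyRange 1 (n + 1) 1).foldl (fun prev _ => rowStepA prev g s k) row0
  PySem.Int.mod
    ((PySem.List.pyRange 0 (k + 1) 1).foldl (fun acc i => acc + PySem.List.pyGetD last i 0) 0)
    MODC

-- ===== PORT B =====
-- structural recursion over the row carrying the running prefix sum `pref`
-- (the loop `for v in row: new.append((v*g+s*pref)%MOD); pref=(pref+v)%MOD`)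
def rowStepB (g s : Int) : List Int → Int → List Int
  | [], _ => []
  | v :: rest, pref =>
      PySem.Int.mod (v * g + s * pref) MODC :: rowStepB g s rest (PySem.Int.mod (pref + v) MODC)

def count_bottomup_alt (n : Int) (k : Int) (s : Int) (a : Int) : Int :=
  let g := PySem.Int.mod (k * a) MODC
  let row0 := 1 :: List.replicate k.toNat 0
  let last := (PySem.List.pyRange 0 n 1).foldl (fun row _ => rowStepB g s row 0) row0
  PySem.Int.mod (last.foldl (· + ·) 0) MODC

-- ===== PRECONDITION & SPEC =====
-- A raises IndexError at dp[0][0] = 1 when n < 0 (no rows) or k < 0 (empty row).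
def Pre_count_bottomup (n : Int) (k : Int) (s : Int) (a : Int) : Prop := 0 ≤ n ∧ 0 ≤ k
instance (n : Int) (k : Int) (s : Int) (a : Int) : Decidable (Pre_count_bottomup n k s a) := by unfold Pre_count_bottomup; infer_instance
def pvWitness_count_bottomup : Int × Int × Int × Int := (2, 3, 5, 7)

def Spec_count_bottomup (n : Int) (k : Int) (s : Int) (a : Int) (out : Int) : Prop := out = count_bottomup_alt n k s a
instance (n : Int) (k : Int) (s : Int) (a : Int) (out : Int) : Decidable (Spec_count_bottomup n k s a out) := by unfold Spec_count_bottomup; infer_instance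

-- ===== CLAIM (what is proved, stated in full; the proofs are below) =====
def Claim_equal_count_bottomup : Prop := ∀ (n : Int) (k : Int) (s : Int) (a : Int), Dom_count_bottomup n k s a → Pre_count_bottomup n k s a → Spec_count_bottomup n k s a (count_bottomup n k s a)

-- ===== LEMMAS AND PROOFS =====

theorem MODC_pos : 0 < MODC := by unfold MODC; norm_num

theorem pm_eq (x : Int) : PySem.Int.mod x MODC = x % MODC :=
  PySem.Int.mod_eq_emod_of_pos MODC_pos

-- the value both row steps compute at position j: (prev[j]*g + s*sum(prev[:j])) % MOD
def specRow (g s : Int) (prev : List Int) : List Int :=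
  (List.range prev.length).map
    (fun j => (prev.getD j 0 * g + s * (prev.take j).sum) % MODC)

theorem specRow_length (g s : Int) (prev : List Int) : (specRow g s prev).length = prev.length := by
  simp [specRow]

-- A's inner loop over l in range(j): adds s * (sum of the first j entries), mod MODC
theorem innerA (s : Int) (prev : List Int) (w : Int) : ∀ (j : Nat), j ≤ prev.length →
    (PySem.List.pyRange 0 (j : Int) 1).foldl
      (fun acc l => PySem.Int.mod (acc + s * PySem.List.pyGetD prev l 0) MODC)
      (PySem.Int.mod w MODC)
    = (w + s * (prev.take j).sum) % MODC := by
  intro j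
  induction j with
  | zero => intro _; simp [PySem.List.pyRange_one_eq_nil, pm_eq]
  | succ j ih =>
      intro hj
      have hlt : j < prev.length := hj
      have hc : ((j + 1 : Nat) : Int) = (j : Int) + 1 := by push_cast; ring
      rw [hc, PySem.List.pyRange_one_succ_right (by positivity), List.foldl_append,
        ih (Nat.le_of_succ_le hj)]
      simp only [List.foldl_cons, List.foldl_nil, PySem.List.pyGetD_natCast, pm_eq]
      rw [Int.emod_add_emod, List.sum_take_succ _ _ hlt]
      congr 1
      have : prev.getD j 0 = prev[j] := List.getD_eq_getElem prev 0 hlt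
      rw [this]; ring

-- A's row step computes specRow (for a row of the right length)
theorem rowStepA_eq_specRow (g s k : Int) (prev : List Int) (hk : 0 ≤ k)
    (hlen : prev.length = (k + 1).toNat) : rowStepA prev g s k = specRow g s prev := by
  unfold rowStepA specRow
  have hk1 : ((k + 1).toNat : Int) = k + 1 := Int.toNat_of_nonneg (by omega)
  rw [PySem.List.pyRange_one, hlen]
  simp only [sub_zero, List.map_map]
  apply List.map_congr_left
  intro j hj
  have hjlt : j < (k + 1).toNat := List.mem_range.mp hj
  simp only [Function.comp, zero_add, PySem.List.pyGetD_natCast]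
  exact innerA s prev _ j (by omega)

-- B's row step computes specRow (running prefix sum, shifted by the part already consumed)
theorem rowStepB_char (g s : Int) : ∀ (rest : List Int) (S : Int),
    rowStepB (PySem.Int.mod g MODC) s rest (S % MODC)
    = (List.range rest.length).map
        (fun j => (rest.getD j 0 * g + s * (S + (rest.take j).sum)) % MODC) := by
  intro rest
  induction rest with
  | nil => intro S; simp [rowStepB]
  | cons v rest ih =>
      intro S
      rw [rowStepB]
      have h2 : PySem.Int.mod (S % MODC + v) MODC = (S + v) % MODC := by
        rw [pm_eq, Int.emod_add_emod]
      rw [h2, ih (S + v)]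
      have hhead : PySem.Int.mod (v * PySem.Int.mod g MODC + s * (S % MODC)) MODC
          = (v * g + s * S) % MODC := by
        rw [pm_eq, pm_eq, Int.add_emod, Int.mul_emod v, Int.mul_emod s,
          Int.emod_emod_of_dvd _ dvd_rfl, Int.emod_emod_of_dvd _ dvd_rfl,
          ← Int.mul_emod v, ← Int.mul_emod s, ← Int.add_emod]
      rw [List.length_cons, List.range_succ_eq_map, List.map_cons, List.map_map, hhead]
      congr 1
      · simp
      · apply List.map_congr_left
        intro j _
        simp only [Function.comp, Nat.succ_eq_add_one, List.getD_cons_succ, List.take_succ_cons,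
          List.sum_cons]
        congr 2
        ring

theorem rowStepB_eq_specRow (g s : Int) (prev : List Int) :
    rowStepB (PySem.Int.mod g MODC) s prev 0 = specRow g s prev := by
  have h0 : (0 : Int) = 0 % MODC := (Int.zero_emod MODC).symm
  rw [h0, rowStepB_char g s prev 0]
  unfold specRow
  apply List.map_congr_left
  intro j _
  norm_num

-- a fold that ignores the list elements is function iteration
theorem foldl_const_iterate {α : Type} (F : α → α) : ∀ (l : List Int) (init : α),
    l.foldl (fun x _ => F x) init = F^[l.length] init := by
  intro l
  induction l with
  | nil => intro init; simp
  | cons x xs ih => intro init; simp [ih, Function.iterate_succ_apply]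

-- the two iterations agree (and rows keep length (k+1).toNat)
theorem iterate_eq (g s k : Int) (hk : 0 ≤ k) : ∀ (m : Nat),
    (fun prev => rowStepA prev g s k)^[m] ((List.replicate (k + 1).toNat 0).set 0 1)
      = (fun row => rowStepB (PySem.Int.mod g MODC) s row 0)^[m] (1 :: List.replicate k.toNat 0)
    ∧ ((fun prev => rowStepA prev g s k)^[m] ((List.replicate (k + 1).toNat 0).set 0 1)).length
      = (k + 1).toNat := by
  have hrow0 : (List.replicate (k + 1).toNat (0 : Int)).set 0 1 = 1 :: List.replicate k.toNat (0 : Int) := by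
    have : (k + 1).toNat = k.toNat + 1 := by omega
    rw [this, List.replicate_succ, List.set_cons_zero]
  intro m
  induction m with
  | zero => simpa using hrow0
  | succ m ih =>
      rcases ih with ⟨heq, hlen⟩
      constructor
      · rw [Function.iterate_succ_apply', Function.iterate_succ_apply', ← heq,
          rowStepA_eq_specRow g s k _ hk hlen, rowStepB_eq_specRow]
      · rw [Function.iterate_succ_apply', rowStepA_eq_specRow g s k _ hk hlen,
          specRow_length, hlen]

theorem count_bottomup_spec : Claim_equal_count_bottomup := by
  intro n k s a _ hpre
  rcases hpre with ⟨hn, hk⟩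
  unfold Spec_count_bottomup count_bottomup count_bottomup_alt
  simp only []
  rw [foldl_const_iterate, foldl_const_iterate,
    PySem.List.length_pyRange_one, PySem.List.length_pyRange_one]
  have hmlen : (n + 1 - 1).toNat = (n - 0).toNat := by omega
  rw [hmlen]
  obtain ⟨heq, hlen⟩ := iterate_eq (k * a) s k hk (n - 0).toNat
  rw [heq] at hlen ⊢
  -- final sums: A folds pyGetD over range(k+1), B folds over the row itself
  set last := (fun row => rowStepB (PySem.Int.mod (k * a) MODC) s row 0)^[(n - 0).toNat]
    (1 :: List.replicate k.toNat 0) with hlast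
  have hk1 : k + 1 = (last.length : Int) := by rw [hlen]; omega
  rw [hk1, PySem.List.foldl_pyRange_zero_pyGetD' last 0 (fun acc v => acc + v) 0]

-- ===== VERDICT (by name: the statement is the Claim_ definition above) =====
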